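-- pv_equiv track=rewrite | github.com/Maze-0508/IgniteChain | Python/admindash.py | determine_eligible_badge
-- ===== SOURCE A (Python) =====
-- BADGE_TOKEN_REQUIREMENTS = {
--     "Newbie": 10,
--     "Amateur": 30,
--     "Intermediate": 50,
--     "Pro": 75,
--     "entrePROneur": 100
-- }
--
-- def determine_eligible_badge(token_balance):
--     """Determine the highest badge a user can mint based on token balance"""
--     eligible_badges = []
--     for badge, requirement in BADGE_TOKEN_REQUIREMENTS.items():
--         if token_balance >= requirement:
--             eligible_badges.append(badge)
--
--     if not eligible_badges:
--         return None
--
--     # Return the highest tier badge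
--     badge_hierarchy = ["Newbie", "Amateur", "Intermediate", "Pro", "entrePROneur"]
--     for badge in reversed(badge_hierarchy):
--         if badge in eligible_badges:
--             return badge
--
--     return eligible_badges[0]
-- ===== SOURCE B (Python) =====
-- BADGE_TOKEN_REQUIREMENTS = {
--     "Newbie": 10,
--     "Amateur": 30,
--     "Intermediate": 50,
--     "Pro": 75,
--     "entrePROneur": 100
-- }
--
-- def determine_eligible_badge(token_balance):
--     """Determine the highest badge a user can mint based on token balance"""
--     for badge, requirement in reversed(list(BADGE_TOKEN_REQUIREMENTS.items())):
--         if token_balance >= requirement: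
--             return badge
--     return None
-- ===== Notes on version B (the rewrite author's own statement) =====
-- stated objective: simpler
-- what changed: Single reverse pass over the requirements (highest tier first) returning the first badge the balance meets, instead of building an eligible list and then scanning a separate reversed hierarchy.
import Mathlib
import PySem

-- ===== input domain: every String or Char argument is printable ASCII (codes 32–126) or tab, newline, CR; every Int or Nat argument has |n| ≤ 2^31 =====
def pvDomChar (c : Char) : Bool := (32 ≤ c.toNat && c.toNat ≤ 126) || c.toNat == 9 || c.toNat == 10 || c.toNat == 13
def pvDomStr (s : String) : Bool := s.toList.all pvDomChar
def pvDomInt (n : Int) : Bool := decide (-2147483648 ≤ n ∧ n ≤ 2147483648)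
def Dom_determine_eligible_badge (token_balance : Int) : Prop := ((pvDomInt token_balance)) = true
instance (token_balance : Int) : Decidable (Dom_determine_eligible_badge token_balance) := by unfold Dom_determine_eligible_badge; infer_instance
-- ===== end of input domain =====

-- B simplifies A: a single reverse pass over the thresholds (highest first) replaces
-- A's eligible-list build plus second reversed-hierarchy scan; same result, same O(n) cost.

-- ===== PORT A =====
def pvBadgeReqs : List (String × Int) :=
  [("Newbie", 10), ("Amateur", 30), ("Intermediate", 50), ("Pro", 75), ("entrePROneur", 100)]

def pvBadgeHierarchy : List String :=
  ["Newbie", "Amateur", "Intermediate", "Pro", "entrePROneur"]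

-- second loop of A: scan reversed hierarchy, return first badge found in eligible list
def pvScanRev (hier : List String) (eligible : List String) : Option String :=
  match hier with
  | [] => none
  | b :: rest => if eligible.contains b then some b else pvScanRev rest eligible

def determine_eligible_badge (token_balance : Int) : Option String :=
  let eligible_badges :=
    pvBadgeReqs.foldl (fun acc br =>
      if token_balance ≥ br.2 then acc ++ [br.1] else acc) []
  if eligible_badges = [] then none
  else
    match pvScanRev pvBadgeHierarchy.reverse eligible_badges with
    | some b => some b
    | none => eligible_badges.head? -- eligible_badges[0]

-- ===== PORT B =====
def pvFirstMet (token_balance : Int) (l : List (String × Int)) : Option String :=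
  match l with
  | [] => none
  | (b, r) :: rest => if token_balance ≥ r then some b else pvFirstMet token_balance rest

def determine_eligible_badge_alt (token_balance : Int) : Option String :=
  pvFirstMet token_balance pvBadgeReqs.reverse

-- ===== PRECONDITION & SPEC =====
def Spec_determine_eligible_badge (token_balance : Int) (out : Option String) : Prop := out = determine_eligible_badge_alt token_balance
instance (token_balance : Int) (out : Option String) : Decidable (Spec_determine_eligible_badge token_balance out) := by unfold Spec_determine_eligible_badge; infer_instance

-- ===== CLAIM (what is proved, stated in full; the proofs are below) =====
def Claim_equal_determine_eligible_badge : Prop := ∀ (token_balance : Int), Dom_determine_eligible_badge token_balance → Spec_determine_eligible_badge token_balance (determine_eligible_badge token_balance)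

-- ===== LEMMAS AND PROOFS =====

-- ===== VERDICT (by name: the statement is the Claim_ definition above) =====
theorem determine_eligible_badge_spec : Claim_equal_determine_eligible_badge := by
  intro t _
  unfold Spec_determine_eligible_badge determine_eligible_badge determine_eligible_badge_alt
  by_cases h100 : (100:Int) ≤ t <;> by_cases h75 : (75:Int) ≤ t <;>
    by_cases h50 : (50:Int) ≤ t <;> by_cases h30 : (30:Int) ≤ t <;>
    by_cases h10 : (10:Int) ≤ t <;>
    first
    | (exfalso; omega)
    | simp [pvBadgeReqs, pvBadgeHierarchy, pvScanRev, pvFirstMet, h100, h75, h50, h30, h10]
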